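-- pv_equiv track=rewrite | github.com/aeebbr/Algorithm | 2025/02/prog_42626_더맵게.py | solution
-- ===== SOURCE A (Python) =====
-- import heapq
--
-- def solution(scoville, K):
--     answer = 0
--     heapq.heapify(scoville)
--
--     while len(scoville) > 1: # 배열에 원소가 적어도 2개는 남아있어야 함
--         if scoville[0] >= K:
--             break
--
--         tmp = heapq.heappop(scoville) + (heapq.heappop(scoville) * 2)
--         heapq.heappush(scoville, tmp)
--         answer += 1
--
--     else:
--         if scoville[0] < K:
--             answer = -1
--
--     return answer
-- ===== SOURCE B (Python) =====
-- # B: sorted list maintained by linear insertion instead of a binary heap; return value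
-- # only — A additionally heap-orders its argument in place, B leaves it untouched.
-- def _insort(s, x):
--     i = 0
--     while i < len(s) and s[i] <= x:
--         i += 1
--     s.insert(i, x)
--
-- def solution(scoville, K):
--     s = sorted(scoville)
--     answer = 0
--     while len(s) > 1:
--         if s[0] >= K:
--             break
--         a = s.pop(0)
--         b = s.pop(0)
--         _insort(s, a + 2 * b)
--         answer += 1
--     else:
--         if s[0] < K:
--             answer = -1
--     return answer
-- ===== Notes on version B (the rewrite author's own statement) =====
-- stated objective: alternative
-- what changed: Replaces the binary min-heap with a sorted list: sort once, pop the two smallest from the front and re-insert the merge at its ordered position, instead of heapify/heappop/heappush.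
import Mathlib
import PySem

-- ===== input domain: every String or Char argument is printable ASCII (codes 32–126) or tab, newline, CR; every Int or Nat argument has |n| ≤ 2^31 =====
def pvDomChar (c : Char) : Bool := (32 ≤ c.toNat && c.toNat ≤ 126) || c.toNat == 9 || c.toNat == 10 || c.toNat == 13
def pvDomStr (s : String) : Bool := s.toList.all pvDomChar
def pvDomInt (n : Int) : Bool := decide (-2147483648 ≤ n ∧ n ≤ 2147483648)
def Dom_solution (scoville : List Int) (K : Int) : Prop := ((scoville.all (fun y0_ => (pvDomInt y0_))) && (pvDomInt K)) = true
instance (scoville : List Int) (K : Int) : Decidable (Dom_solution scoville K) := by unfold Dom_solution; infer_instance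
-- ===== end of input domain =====

-- B replaces A's binary min-heap with a sorted list (sort once, pop two smallest from the
-- front, re-insert the merge at its ordered position); return value only — A additionally
-- heap-orders its argument in place, B leaves it untouched.


-- ===== PORT A =====
-- heapq is ported by its priority-queue semantics on the list of elements:
-- heapify = the same elements (only the minimum is ever observed), scoville[0] on the
-- heap = the minimum, heappop = remove one occurrence of the minimum, heappush = append.
-- The `while len > 1 … else` statement becomes this recursion, with fuel = list length
-- as the totality guard (each iteration shortens the list by one, so fuel never runs
-- out before the while-condition fails); the `else:` arm (loop ended without break) is
-- the trailing `if`, where Python's scoville[0] raises on [] (excluded by Pre_solution).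
def heapLoop : Nat → List Int → Int → Int → Int
  | 0, l, K, answer => if l.head?.getD 0 < K then -1 else answer
  | fuel + 1, l, K, answer =>
    if 1 < l.length then
      if (l.min?.getD 0) ≥ K then answer   -- if scoville[0] >= K: break
      else
        -- tmp = heappop + 2*heappop; heappush tmp; answer += 1
        heapLoop fuel
          (((l.erase (l.min?.getD 0)).erase ((l.erase (l.min?.getD 0)).min?.getD 0))
            ++ [(l.min?.getD 0) + 2 * ((l.erase (l.min?.getD 0)).min?.getD 0)]) K (answer + 1)
    else if l.head?.getD 0 < K then -1 else answer

def solution (scoville : List Int) (K : Int) : Int :=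
  heapLoop scoville.length scoville K 0

-- ===== PORT B =====
-- _insort: walk past the elements ≤ x, insert x there (Source B's linear while loop).
def insortB (x : Int) : List Int → List Int
  | [] => [x]
  | y :: ys => if y ≤ x then y :: insortB x ys else x :: y :: ys

-- while len(s) > 1: if s[0] >= K: break; a, b = two front pops; _insort(s, a + 2*b);
-- answer += 1 … else: if s[0] < K: answer = -1.  Same fuel guard as above.
def sortLoop : Nat → List Int → Int → Int → Int
  | 0, l, K, answer => if l.head?.getD 0 < K then -1 else answer
  | fuel + 1, l, K, answer =>
    match l with
    | a :: b :: rest =>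
        if a ≥ K then answer
        else sortLoop fuel (insortB (a + 2 * b) rest) K (answer + 1)
    | _ => if l.head?.getD 0 < K then -1 else answer

def solution_alt (scoville : List Int) (K : Int) : Int :=
  sortLoop (scoville.mergeSort (fun a b => decide (a ≤ b))).length
    (scoville.mergeSort (fun a b => decide (a ≤ b))) K 0

-- ===== PRECONDITION & SPEC =====
-- Pre_ excludes only the empty list, on which A raises IndexError (scoville[0] in the
-- while-else arm); B raises there too.
def Pre_solution (scoville : List Int) (K : Int) : Prop := scoville ≠ []
instance (scoville : List Int) (K : Int) : Decidable (Pre_solution scoville K) := by unfold Pre_solution; infer_instance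
def pvWitness_solution : List Int × Int := ([1, 2, 3, 9, 10, 12], 7)

def Spec_solution (scoville : List Int) (K : Int) (out : Int) : Prop := out = solution_alt scoville K
instance (scoville : List Int) (K : Int) (out : Int) : Decidable (Spec_solution scoville K out) := by unfold Spec_solution; infer_instance

-- ===== CLAIM (what is proved, stated in full; the proofs are below) =====
def Claim_equal_solution : Prop := ∀ (scoville : List Int) (K : Int), Dom_solution scoville K → Pre_solution scoville K → Spec_solution scoville K (solution scoville K)

-- ===== LEMMAS AND PROOFS =====

theorem insortB_length (x : Int) (l : List Int) : (insortB x l).length = l.length + 1 := by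
  induction l with
  | nil => rfl
  | cons y ys ih =>
    simp only [insortB]
    split <;> simp [ih]

-- The head of a sorted list is the minimum of any permutation of it.
theorem min?_of_perm_sorted (a : Int) (t l : List Int)
    (hs : (a :: t).Pairwise (· ≤ ·)) (hp : l.Perm (a :: t)) : l.min? = some a := by
  rw [List.min?_eq_some_iff]
  refine ⟨hp.mem_iff.mpr (List.mem_cons_self ..), ?_⟩
  intro b hb
  rcases List.mem_cons.mp (hp.mem_iff.mp hb) with h | h
  · simp [h]
  · exact (List.pairwise_cons.mp hs).1 b h

theorem insortB_perm (x : Int) (l : List Int) : (insortB x l).Perm (x :: l) := by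
  induction l with
  | nil => exact List.Perm.refl _
  | cons y ys ih =>
    simp only [insortB]
    split
    · exact (ih.cons y).trans (List.Perm.swap x y ys)
    · exact List.Perm.refl _

theorem insortB_pairwise (x : Int) (l : List Int) (hs : l.Pairwise (· ≤ ·)) :
    (insortB x l).Pairwise (· ≤ ·) := by
  induction l with
  | nil => simp [insortB]
  | cons y ys ih =>
    obtain ⟨hy, hys⟩ := List.pairwise_cons.mp hs
    simp only [insortB]
    split
    · rename_i hle
      rw [List.pairwise_cons]
      refine ⟨?_, ih hys⟩
      intro z hz
      rcases List.mem_cons.mp ((insortB_perm x ys).mem_iff.mp hz) with h | h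
      · omega
      · exact hy z h
    · rename_i hgt
      rw [List.pairwise_cons]
      refine ⟨?_, hs⟩
      intro z hz
      rcases List.mem_cons.mp hz with h | h
      · omega
      · have := hy z h; omega

-- Loop invariant: s is sorted, l is a permutation of s, and the shared fuel bounds the
-- length; then the heap loop on l and the sorted-list loop on s return the same answer.
theorem loop_eq (fuel : Nat) : ∀ (s l : List Int), s.length ≤ fuel → s.Pairwise (· ≤ ·) →
    l.Perm s → ∀ (K ans : Int), heapLoop fuel l K ans = sortLoop fuel s K ans := by
  induction fuel with
  | zero =>
    intro s l hn hs hp K ans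
    have hs0 : s = [] := List.eq_nil_of_length_eq_zero (Nat.le_zero.mp hn)
    subst hs0
    have hl0 : l = [] := hp.eq_nil
    subst hl0
    rfl
  | succ fuel ih =>
    intro s l hn hs hp K ans
    match s with
    | [] =>
      have hl0 : l = [] := hp.eq_nil
      subst hl0
      rfl
    | [a] =>
      have hl : l = [a] := List.perm_singleton.mp hp
      subst hl
      rfl
    | a :: b :: rest =>
      have hlen : l.length = rest.length + 2 := by
        rw [hp.length_eq]; simp
      have h1 : 1 < l.length := by omega
      have hmin : l.min? = some a :=
        min?_of_perm_sorted a (b :: rest) l hs hp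
      rw [heapLoop, if_pos h1, hmin]
      simp only [Option.getD_some]
      by_cases hK : a ≥ K
      · rw [if_pos hK, sortLoop, if_pos hK]
      · rw [if_neg hK, sortLoop, if_neg hK]
        have hperm1 : (l.erase a).Perm (b :: rest) := by
          have := hp.erase a
          rwa [List.erase_cons_head] at this
        have hrest : (b :: rest).Pairwise (· ≤ ·) := (List.pairwise_cons.mp hs).2
        have hmin2 : (l.erase a).min? = some b :=
          min?_of_perm_sorted b rest (l.erase a) hrest hperm1
        rw [hmin2]
        simp only [Option.getD_some]
        apply ih
        · rw [insortB_length]; simp at hn; omega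
        · exact insortB_pairwise _ rest (List.pairwise_cons.mp hrest).2
        · refine List.Perm.trans ?_ (insortB_perm (a + 2 * b) rest).symm
          refine List.Perm.trans (List.Perm.append_right _ ?_) List.perm_append_comm
          have := hperm1.erase b
          rwa [List.erase_cons_head] at this

theorem mergeSort_le_pairwise (l : List Int) :
    (l.mergeSort (fun a b => decide (a ≤ b))).Pairwise (· ≤ ·) := by
  have := List.pairwise_mergeSort (le := fun a b : Int => decide (a ≤ b))
    (by intro a b c hab hbc; simp at hab hbc ⊢; omega)
    (by intro a b; simp; omega) l
  simpa using this

-- ===== VERDICT (by name: the statement is the Claim_ definition above) =====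
theorem solution_spec : Claim_equal_solution := by
  intro scoville K _ _
  unfold Spec_solution solution solution_alt
  have hlen : (scoville.mergeSort (fun a b => decide (a ≤ b))).length = scoville.length :=
    (List.mergeSort_perm scoville _).length_eq
  rw [hlen]
  exact loop_eq scoville.length _ scoville (le_of_eq hlen)
    (mergeSort_le_pairwise scoville) (List.mergeSort_perm scoville _).symm K 0
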